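-- pv_equiv track=rewrite | github.com/MetOffice/CDDS | mip_convert/mip_convert/plugins/base/data/processors.py | _lut_categorisation
-- ===== SOURCE A (Python) =====
-- def _lut_categorisation(coordinate, value):
--     """
--     Reads in a UM/JULES tile ID and returns a CMIP6/LUMIP land use type number
--     psl=natural=0, crp=crop=1, pst=pasture=2, urb=urban=3
--
--     >>> _lut_categorisation(None, 1)
--     0
--     >>> _lut_categorisation(None, 301)
--     1
--     >>> _lut_categorisation(None, 402)
--     2
--     >>> _lut_categorisation(None, 6)
--     3
--     >>> _lut_categorisation(None, 9)
--     -999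
--
--     Unrecognized UM/JULES tile ids are given a CMIP6/LUMIP land use type None
--
--     Calculate CMIP6 diagnostics on 'Land Use Types' from UM outputs
--     Land Use Types are defined by the LUMIP paper
--     Lawrence et al, 2016. Geosci. Model Dev. Discuss., doi:10.5194/gmd-2016-76
--     'The Land Use Model Intercomparison Project (LUMIP): Rationale and experimental design'
--     CMIP6 diagnostics on Land Use Types generally end in 'Lut'
--     There are four Land Use Types in this explicit order:
--     primary and secondary land (psl), cropland (crp), pastureland (pst) and urban (urb)
--     Our interpretation is that psl=natural PFTs, crp=crop PFTs, pst=pasture PFTs, urb=urban tile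
--     Note that, using this interpretation, bare soil, lakes and ice are not included.
--     """
--     lut_ids = {
--         0: [1, 101, 102, 103, 2, 201, 202, 3, 4, 5, 501, 502],
--         1: [301, 401],
--         2: [302, 402],
--         3: [6]
--     }
--     lookup = {value: -999}
--     for lut, um_ids in list(lut_ids.items()):
--         lookup.update({um_id: lut for um_id in um_ids})
--     return lookup[value]
-- ===== SOURCE B (Python) =====
-- def _lut_categorisation(coordinate, value):
--     """Arithmetic decoding of the tile id instead of a table: ids 1-5 are
--     natural PFTs, 6 is urban, and three-digit ids split as q=hundreds (base
--     PFT), r=variant; crop/pasture bases (3,4) map variant 1->crop, 2->pasture,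
--     natural bases (1,2,5) keep their allowed variants natural."""
--     if 1 <= value <= 5:
--         return 0
--     if value == 6:
--         return 3
--     q, r = divmod(value, 100)
--     if q in (1, 2, 5) and 1 <= r <= (3 if q == 1 else 2):
--         return 0
--     if q in (3, 4) and r in (1, 2):
--         return r
--     return -999
-- ===== Notes on version B (the rewrite author's own statement) =====
-- stated objective: alternative
-- what changed: B replaces the table inversion/lookup entirely by arithmetic decoding of the tile id (divmod by 100: hundreds digit = base PFT, remainder = variant), deriving the lut number from the digits instead of consulting any id list.
import Mathlib
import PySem

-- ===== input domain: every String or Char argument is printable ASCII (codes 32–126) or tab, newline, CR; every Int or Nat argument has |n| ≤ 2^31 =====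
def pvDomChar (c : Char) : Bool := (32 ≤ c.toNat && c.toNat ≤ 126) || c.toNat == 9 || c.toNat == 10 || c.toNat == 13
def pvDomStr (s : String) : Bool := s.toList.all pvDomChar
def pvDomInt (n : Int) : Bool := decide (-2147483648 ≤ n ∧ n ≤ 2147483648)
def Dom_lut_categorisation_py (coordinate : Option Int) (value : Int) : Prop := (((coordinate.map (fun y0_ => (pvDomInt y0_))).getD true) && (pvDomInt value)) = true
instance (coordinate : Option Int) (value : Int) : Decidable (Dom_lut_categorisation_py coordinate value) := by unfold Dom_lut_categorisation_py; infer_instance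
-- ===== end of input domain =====

-- B decodes the tile id arithmetically (divmod by 100) instead of inverting a table into a lookup dict (objective: alternative).
-- ===== PORT A =====
-- lut_ids as an insertion-ordered association list (Python dict literal)
def lutIdsA : List (Int × List Int) :=
  [(0, [1, 101, 102, 103, 2, 201, 202, 3, 4, 5, 501, 502]),
   (1, [301, 401]),
   (2, [302, 402]),
   (3, [6])]

def lut_categorisation_py (coordinate : Option Int) (value : Int) : Int :=
  -- lookup = {value: -999}; for lut, um_ids in lut_ids.items(): lookup.update({um_id: lut for um_id in um_ids})
  let lookup : PySem.Dict Int Int := PySem.Dict.empty.insert value (-999)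
  let lookup := lutIdsA.foldl (fun d p => p.2.foldl (fun d umId => d.insert umId p.1) d) lookup
  -- return lookup[value]  (the key 'value' is always present, seeded above; getD's default is unreachable)
  (lookup.get? value).getD 0

-- ===== PORT B =====
def lut_categorisation_py_alt (coordinate : Option Int) (value : Int) : Int :=
  if 1 ≤ value ∧ value ≤ 5 then 0
  else if value = 6 then 3
  else
    let q := PySem.Int.floordiv value 100
    let r := PySem.Int.mod value 100
    if (q = 1 ∨ q = 2 ∨ q = 5) ∧ (1 ≤ r ∧ r ≤ (if q = 1 then 3 else 2)) then 0
    else if (q = 3 ∨ q = 4) ∧ (r = 1 ∨ r = 2) then r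
    else -999

-- ===== PRECONDITION & SPEC =====
def Spec_lut_categorisation_py (coordinate : Option Int) (value : Int) (out : Int) : Prop := out = lut_categorisation_py_alt coordinate value
instance (coordinate : Option Int) (value : Int) (out : Int) : Decidable (Spec_lut_categorisation_py coordinate value out) := by unfold Spec_lut_categorisation_py; infer_instance

-- ===== CLAIM (what is proved, stated in full; the proofs are below) =====
def Claim_equal_lut_categorisation_py : Prop := ∀ (coordinate : Option Int) (value : Int), Dom_lut_categorisation_py coordinate value → Spec_lut_categorisation_py coordinate value (lut_categorisation_py coordinate value)

-- ===== LEMMAS AND PROOFS =====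

-- ===== VERDICT (by name: the statement is the Claim_ definition above) =====
theorem lut_categorisation_py_spec : Claim_equal_lut_categorisation_py := by
  intro coordinate value _
  unfold Spec_lut_categorisation_py
  by_cases h : value ∈ ([1, 101, 102, 103, 2, 201, 202, 3, 4, 5, 501, 502, 301, 401, 302, 402, 6] : List Int)
  · simp only [List.mem_cons, List.not_mem_nil, or_false] at h
    rcases h with rfl | rfl | rfl | rfl | rfl | rfl | rfl | rfl | rfl | rfl | rfl | rfl | rfl | rfl | rfl | rfl | rfl <;> rfl
  · simp only [List.mem_cons, List.not_mem_nil, or_false, not_or] at h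
    obtain ⟨h1, h2, h3, h4, h5, h6, h7, h8, h9, h10, h11, h12, h13, h14, h15, h16, h17⟩ := h
    have hA : lut_categorisation_py coordinate value = -999 := by
      simp only [lut_categorisation_py, lutIdsA, List.foldl, PySem.Dict.get?_insert,
        if_neg h1, if_neg h2, if_neg h3, if_neg h4, if_neg h5, if_neg h6, if_neg h7,
        if_neg h8, if_neg h9, if_neg h10, if_neg h11, if_neg h12, if_neg h13,
        if_neg h14, if_neg h15, if_neg h16, if_neg h17]
      simp
    have hqr := PySem.Int.floordiv_mul_add_mod value 100
    have hB : lut_categorisation_py_alt coordinate value = -999 := by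
      simp only [lut_categorisation_py_alt]
      split_ifs <;> omega
    rw [hA, hB]
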